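-- pv_equiv track=rewrite | github.com/yiclwh/System-Design | 3_1_3_Tiny Url.py | idToShortKey
-- ===== SOURCE A (Python) =====
-- def idToShortKey(id):
--     ch = "abcdefghijklmnopqrstuvwxyzABCDEFGHIJKLMNOPQRSTUVWXYZ0123456789"
--     s = ""
--     while id > 0:
--         s = ch[id % 62] + s
--         id //= 62
--     while len(s) < 6:
--         s = 'a' + s
--     return s
-- ===== SOURCE B (Python) =====
-- def idToShortKey(id):
--     ch = "abcdefghijklmnopqrstuvwxyzABCDEFGHIJKLMNOPQRSTUVWXYZ0123456789"
--     n = id if id > 0 else 0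
--     digits = 0
--     t = n
--     while t > 0:
--         digits += 1
--         t //= 62
--     width = digits if digits > 6 else 6
--     return ''.join(ch[(n // 62 ** i) % 62] for i in range(width - 1, -1, -1))
-- ===== Notes on version B (the rewrite author's own statement) =====
-- stated objective: alternative
-- what changed: A builds the key least-significant-digit first by repeatedly prepending ch[id % 62] and then pads with 'a'; B first counts the base-62 digits, takes width = max(digits, 6), and emits the key forward most-significant-first as ch[(n // 62**i) % 62] for i = width-1..0, which also yields the padding for free.
import Mathlib
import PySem

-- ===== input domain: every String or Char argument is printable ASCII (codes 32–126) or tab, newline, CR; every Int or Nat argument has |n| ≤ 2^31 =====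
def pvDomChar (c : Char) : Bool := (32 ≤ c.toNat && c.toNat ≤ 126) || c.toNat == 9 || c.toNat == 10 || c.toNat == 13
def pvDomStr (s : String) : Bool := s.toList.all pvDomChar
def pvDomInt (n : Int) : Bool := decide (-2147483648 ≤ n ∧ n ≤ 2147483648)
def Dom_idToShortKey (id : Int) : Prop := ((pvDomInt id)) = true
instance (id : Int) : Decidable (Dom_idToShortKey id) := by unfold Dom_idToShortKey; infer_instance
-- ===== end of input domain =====

-- B replaces A's least-significant-first prepend loop by a digit-count pass plus a
-- most-significant-first forward emit over i = width-1..0 (objective: alternative decomposition).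

-- ===== PORT A =====
-- the alphabet; ch[id % 62] is always in range (0 ≤ id % 62 < 62), so pyGetD with a default is exact
def chKeyA : List Char := "abcdefghijklmnopqrstuvwxyzABCDEFGHIJKLMNOPQRSTUVWXYZ0123456789".toList

-- while id > 0: s = ch[id % 62] + s; id //= 62
def idLoopA (id : Int) (s : List Char) : List Char :=
  if 0 < id then
    idLoopA (PySem.Int.floordiv id 62) (PySem.List.pyGetD chKeyA (PySem.Int.mod id 62) 'a' :: s)
  else s
termination_by id.toNat
decreasing_by
  rename_i h
  rw [PySem.Int.floordiv_eq_ediv_of_pos (by omega)]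
  omega

-- while len(s) < 6: s = 'a' + s
def padLoopA (s : List Char) : List Char :=
  if s.length < 6 then padLoopA ('a' :: s) else s
termination_by 6 - s.length
decreasing_by simp; omega

def idToShortKey (id : Int) : String :=
  String.ofList (padLoopA (idLoopA id []))

-- ===== PORT B =====
def chKeyB : List Char := "abcdefghijklmnopqrstuvwxyzABCDEFGHIJKLMNOPQRSTUVWXYZ0123456789".toList

-- digits = 0; t = n; while t > 0: digits += 1; t //= 62
def countLoopB (t : Int) (digits : Int) : Int :=
  if 0 < t then countLoopB (PySem.Int.floordiv t 62) (digits + 1) else digits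
termination_by t.toNat
decreasing_by
  rename_i h
  rw [PySem.Int.floordiv_eq_ediv_of_pos (by omega)]
  omega

-- n = id if id > 0 else 0; width = digits if digits > 6 else 6;
-- ''.join(ch[(n // 62 ** i) % 62] for i in range(width - 1, -1, -1))
-- 62 ** i is ported as (62:Int) ^ i.toNat, exact since every i in the range is ≥ 0
def idToShortKey_alt (id : Int) : String :=
  let n : Int := if 0 < id then id else 0
  let digits : Int := countLoopB n 0
  let width : Int := if 6 < digits then digits else 6
  String.ofList ((PySem.List.pyRange (width - 1) (-1) (-1)).map
    (fun i => PySem.List.pyGetD chKeyB (PySem.Int.mod (PySem.Int.floordiv n ((62:Int) ^ i.toNat)) 62) 'a'))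

-- ===== PRECONDITION & SPEC =====
def Spec_idToShortKey (id : Int) (out : String) : Prop := out = idToShortKey_alt id
instance (id : Int) (out : String) : Decidable (Spec_idToShortKey id out) := by unfold Spec_idToShortKey; infer_instance

-- ===== CLAIM (what is proved, stated in full; the proofs are below) =====
def Claim_equal_idToShortKey : Prop := ∀ (id : Int), Dom_idToShortKey id → Spec_idToShortKey id (idToShortKey id)

-- ===== LEMMAS AND PROOFS =====

-- the base-62 digit string of n, most significant first, empty for n = 0 (A's loop result)
def rawDigits (n : Nat) : List Char :=
  if n = 0 then [] else rawDigits (n / 62) ++ [chKeyA.getD (n % 62) 'a']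
termination_by n
decreasing_by omega

lemma idLoopA_eq (id : Int) (s : List Char) (h : 0 ≤ id) :
    idLoopA id s = rawDigits id.toNat ++ s := by
  generalize hn : id.toNat = n
  induction n using Nat.strong_induction_on generalizing id s with
  | _ n ih =>
    rw [idLoopA, rawDigits]
    by_cases hpos : 0 < id
    · rw [if_pos hpos, if_neg (by omega)]
      rw [PySem.Int.floordiv_eq_ediv_of_pos (by omega), PySem.Int.mod_eq_emod_of_pos (by omega)]
      have hdiv : (id / 62).toNat = n / 62 := by omega
      have hmod : id % 62 = ((n % 62 : Nat) : Int) := by omega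
      rw [hmod, PySem.List.pyGetD_natCast]
      rw [ih (n / 62) (by omega) (id / 62) _ (by omega) hdiv]
      simp
    · rw [if_neg hpos, if_pos (by omega)]
      simp

lemma padLoopA_eq (s : List Char) :
    padLoopA s = List.replicate (6 - s.length) 'a' ++ s := by
  generalize hk : 6 - s.length = k
  induction k generalizing s with
  | zero => rw [padLoopA, if_neg (by omega)]; simp
  | succ k ih =>
    rw [padLoopA, if_pos (by omega)]
    rw [ih ('a' :: s) (by simp; omega)]
    rw [List.replicate_succ']
    simp

lemma countLoopB_eq (t : Int) (c : Int) (h : 0 ≤ t) :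
    countLoopB t c = c + ((rawDigits t.toNat).length : Int) := by
  generalize hn : t.toNat = n
  induction n using Nat.strong_induction_on generalizing t c with
  | _ n ih =>
    rw [countLoopB, rawDigits]
    by_cases hpos : 0 < t
    · rw [if_pos hpos, if_neg (by omega)]
      rw [PySem.Int.floordiv_eq_ediv_of_pos (by omega)]
      rw [ih (n / 62) (by omega) (t / 62) _ (by omega) (by omega)]
      simp; omega
    · rw [if_neg hpos, if_pos (by omega)]
      simp

lemma rawDigits_len_le (k : Nat) : ∀ n : Nat, n < 62 ^ k → (rawDigits n).length ≤ k := by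
  induction k with
  | zero => intro n hn; interval_cases n; rw [rawDigits]; simp
  | succ k ih =>
    intro n hn
    rw [rawDigits]
    by_cases h0 : n = 0
    · simp [h0]
    · rw [if_neg h0]
      have : n / 62 < 62 ^ k := by
        rw [Nat.div_lt_iff_lt_mul (by norm_num)]
        calc n < 62 ^ (k + 1) := hn
        _ = 62 ^ k * 62 := by ring
      have := ih (n / 62) this
      simp; omega

lemma emit_eq (k : Nat) : ∀ n : Nat, n < 62 ^ k →
    (List.range k).reverse.map (fun i => chKeyA.getD (n / 62 ^ i % 62) 'a')
      = List.replicate (k - (rawDigits n).length) 'a' ++ rawDigits n := by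
  induction k with
  | zero =>
    intro n hn; interval_cases n
    rw [rawDigits]; simp
  | succ k ih =>
    intro n hn
    by_cases h0 : n = 0
    · subst h0
      rw [rawDigits]
      have hconst : (fun i => chKeyA.getD (0 / 62 ^ i % 62) 'a') = (fun (_ : Nat) => 'a') := by
        funext i
        rw [Nat.zero_div, Nat.zero_mod]
        decide
      rw [hconst, List.map_const']
      simp
    · rw [List.range_succ_eq_map]
      simp only [List.reverse_cons, List.map_reverse, List.map_map, List.map_append,
        List.map_cons, List.map_nil]
      have hstep : ((List.range k).map ((fun i =>
          chKeyA.getD (n / 62 ^ i % 62) 'a') ∘ Nat.succ)) =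
          (List.range k).map (fun i => chKeyA.getD (n / 62 / 62 ^ i % 62) 'a') := by
        apply List.map_congr_left
        intro i _
        have h2 : n / 62 ^ (i + 1) = n / 62 / 62 ^ i := by
          rw [Nat.div_div_eq_div_mul, pow_succ']
        simp only [Function.comp_apply, Nat.succ_eq_add_one, h2]
      have hdivlt : n / 62 < 62 ^ k := by
        rw [Nat.div_lt_iff_lt_mul (by norm_num)]
        calc n < 62 ^ (k + 1) := hn
        _ = 62 ^ k * 62 := by ring
      have hIH := ih (n / 62) hdivlt
      simp only [List.map_reverse] at hIH
      rw [hstep, hIH]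
      conv_rhs => rw [rawDigits, if_neg h0]
      simp [List.append_assoc]

-- each element B emits equals the corresponding Nat-side digit character
lemma bElem_eq (n : Int) (hn : 0 ≤ n) (p : Nat) :
    PySem.List.pyGetD chKeyB (PySem.Int.mod (PySem.Int.floordiv n ((62:Int) ^ p)) 62) 'a'
      = chKeyA.getD (n.toNat / 62 ^ p % 62) 'a' := by
  have hpow : ((62:Int) ^ p) = (((62 ^ p : Nat)) : Int) := by push_cast; ring
  rw [PySem.Int.floordiv_eq_ediv_of_pos (by positivity),
      PySem.Int.mod_eq_emod_of_pos (by norm_num)]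
  have hn' : n = ((n.toNat : Nat) : Int) := (Int.toNat_of_nonneg hn).symm
  have e1 : n / ((62:Int) ^ p) = ((n.toNat / 62 ^ p : Nat) : Int) := by
    rw [hpow, hn']
    exact (Int.natCast_ediv _ _).symm
  have h1 : n / (62:Int) ^ p % 62 = ((n.toNat / 62 ^ p % 62 : Nat) : Int) := by
    rw [e1]
    omega
  rw [h1, PySem.List.pyGetD_natCast]
  rfl

lemma core_eq (n : Int) (h0 : 0 ≤ n) (h6 : n.toNat < 62 ^ 6) :
    String.ofList (padLoopA (rawDigits n.toNat)) =
    String.ofList ((PySem.List.pyRange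
        ((if 6 < countLoopB n 0 then countLoopB n 0 else 6) - 1) (-1) (-1)).map
      (fun i => PySem.List.pyGetD chKeyB
        (PySem.Int.mod (PySem.Int.floordiv n ((62:Int) ^ i.toNat)) 62) 'a')) := by
  have hcount : countLoopB n 0 = ((rawDigits n.toNat).length : Int) := by
    rw [countLoopB_eq n 0 h0]; ring
  have hlen : (rawDigits n.toNat).length ≤ 6 := rawDigits_len_le 6 _ h6
  rw [hcount, if_neg (by omega)]
  have hrange : PySem.List.pyRange ((6:Int) - 1) (-1) (-1) = [5, 4, 3, 2, 1, 0] := by decide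
  rw [hrange]
  simp only [List.map_cons, List.map_nil]
  rw [bElem_eq n h0, bElem_eq n h0, bElem_eq n h0, bElem_eq n h0, bElem_eq n h0, bElem_eq n h0]
  have hemit := emit_eq 6 n.toNat h6
  have hrev : (List.range 6).reverse = [5, 4, 3, 2, 1, 0] := by decide
  rw [hrev] at hemit
  simp only [List.map_cons, List.map_nil] at hemit
  rw [padLoopA_eq]
  norm_num at hemit
  refine congrArg String.ofList ?_
  rw [← hemit]
  norm_num [show ((5:Int).toNat) = 5 from rfl, show ((4:Int).toNat) = 4 from rfl,
    show ((3:Int).toNat) = 3 from rfl, show ((2:Int).toNat) = 2 from rfl,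
    show ((1:Int).toNat) = 1 from rfl]

-- ===== VERDICT (by name: the statement is the Claim_ definition above) =====
theorem idToShortKey_spec : Claim_equal_idToShortKey := by
  intro id hdom
  have hdb : -2147483648 ≤ id ∧ id ≤ 2147483648 := by
    have := hdom
    unfold Dom_idToShortKey pvDomInt at this
    exact of_decide_eq_true this
  show idToShortKey id = idToShortKey_alt id
  unfold idToShortKey idToShortKey_alt
  by_cases hpos : 0 < id
  · simp only [if_pos hpos]
    rw [idLoopA_eq id [] (by omega), List.append_nil]
    exact core_eq id (by omega) (by simp; omega)
  · simp only [if_neg hpos]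
    rw [idLoopA, if_neg hpos]
    have h0 : ([] : List Char) = rawDigits (0:Int).toNat := by rw [rawDigits]; simp
    rw [h0]
    exact core_eq 0 (by omega) (by norm_num)
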